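-- pv_equiv track=rewrite | github.com/HyunwooKoh/CodingTest | programmers/한투/sol2.py | solution
-- ===== SOURCE A (Python) =====
-- def solution(contests, k, p):
--     answer = [i for i in range(len(contests))]
--     prob4Con = {}
--
--     for i in range(len(contests)):
--         cnt = 0
--         for j in range(len(contests[i])):
--             if contests[i][j] <= p:
--                 cnt += 1
--         prob4Con[i] = cnt
--
--     answer.sort(key = lambda x : (-prob4Con[x], x))
--     return sorted(answer[0:k])
-- ===== SOURCE B (Python) =====
-- def solution(contests, k, p):
--     # Bucket indices by their count of problems <= p, then collect from the
--     # highest bucket down until k indices are taken; no full sort of indices.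
--     buckets = {}
--     top = 0
--     for i, c in enumerate(contests):
--         cnt = 0
--         for x in c:
--             if x <= p:
--                 cnt += 1
--         buckets.setdefault(cnt, []).append(i)
--         if cnt > top:
--             top = cnt
--     picked = []
--     need = k
--     cnt = top
--     while need > 0 and cnt >= 0:
--         for i in buckets.get(cnt, []):
--             if need <= 0:
--                 break
--             picked.append(i)
--             need -= 1
--         cnt -= 1
--     return sorted(picked)
-- ===== Notes on version B (the rewrite author's own statement) =====
-- stated objective: alternative
-- what changed: Instead of sorting all indices by (-count, index) and slicing the first k, B groups indices into count-keyed buckets in one pass while tracking the maximum count, then collects indices from the highest bucket downward until k are taken.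
-- outside the precondition, e.g. on solution([[1], [2]], -1, 5): A returns [0], B returns []
import Mathlib
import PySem

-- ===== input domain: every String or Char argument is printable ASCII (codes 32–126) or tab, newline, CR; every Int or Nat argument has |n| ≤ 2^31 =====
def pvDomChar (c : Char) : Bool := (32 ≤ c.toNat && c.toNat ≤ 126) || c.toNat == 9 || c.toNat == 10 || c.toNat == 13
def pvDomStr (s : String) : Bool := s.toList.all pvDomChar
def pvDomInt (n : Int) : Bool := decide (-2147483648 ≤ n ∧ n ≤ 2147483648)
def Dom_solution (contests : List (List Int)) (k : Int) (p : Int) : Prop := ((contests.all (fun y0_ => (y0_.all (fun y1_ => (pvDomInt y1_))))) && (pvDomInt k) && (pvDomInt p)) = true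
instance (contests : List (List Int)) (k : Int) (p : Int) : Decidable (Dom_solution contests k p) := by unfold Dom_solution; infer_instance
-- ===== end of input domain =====

-- B replaces sort-all-indices-and-slice by bucketing indices by their count and
-- collecting from the highest bucket downward until k are taken (alternative selection structure).

-- ===== PORT A =====
def solution (contests : List (List Int)) (k : Int) (p : Int) : List Int :=
  let answer := PySem.List.pyRange 0 (PySem.List.len contests) 1
  let prob4Con : PySem.Dict Int Int :=
    (PySem.List.pyRange 0 (PySem.List.len contests) 1).foldl (fun d i =>
      let row := PySem.List.pyGetD contests i []
      let cnt := (PySem.List.pyRange 0 (PySem.List.len row) 1).foldl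
        (fun cnt j => if PySem.List.pyGetD row j 0 ≤ p then cnt + 1 else cnt) (0 : Int)
      d.insert i cnt) PySem.Dict.empty
  -- prob4Con[x]: the key is always present (x ∈ range(len(contests))), ported as getD 0
  let answer2 := PySem.List.sorted2 answer (fun x => -(prob4Con.getD x 0)) (fun x => x) false
  PySem.List.sorted (PySem.List.slice answer2 (some 0) (some k)) (fun x => x) false

-- ===== PORT B =====
-- inner `for i in buckets.get(cnt, [])` with its `break` on need <= 0
def pickInner : List Int → List Int → Int → (List Int × Int)
  | [], picked, need => (picked, need)
  | i :: rest, picked, need =>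
      if need ≤ 0 then (picked, need) else pickInner rest (picked ++ [i]) (need - 1)

-- outer `while need > 0 and cnt >= 0` loop
def pickLoop (buckets : PySem.Dict Int (List Int)) (need cnt : Int) (picked : List Int) : List Int :=
  if 0 < need ∧ 0 ≤ cnt then
    let r := pickInner (buckets.getD cnt []) picked need
    pickLoop buckets r.2 (cnt - 1) r.1
  else picked
termination_by (cnt + 1).toNat
decreasing_by omega

def solution_alt (contests : List (List Int)) (k : Int) (p : Int) : List Int :=
  let st := (PySem.List.enumerate contests).foldl
    (fun (acc : PySem.Dict Int (List Int) × Int) ic =>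
      let cnt := ic.2.foldl (fun cnt x => if x ≤ p then cnt + 1 else cnt) (0 : Int)
      (acc.1.modify cnt [] (· ++ [ic.1]), if acc.2 < cnt then cnt else acc.2))
    (PySem.Dict.empty, 0)
  PySem.List.sorted (pickLoop st.1 k st.2 []) (fun x => x) false

-- ===== PRECONDITION & SPEC =====
-- Pre_ excludes negative k with -len(contests) < k < 0 (outside the natural 'top k' domain):
-- there A's slice answer[0:k] accidentally returns all but the last |k| entries, while B
-- naturally selects nothing; for k ≤ -len(contests) both return [] and that stays claimed.
def Pre_solution (contests : List (List Int)) (k : Int) (p : Int) : Prop :=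
  0 ≤ k ∨ k + (contests.length : Int) ≤ 0
instance (contests : List (List Int)) (k : Int) (p : Int) : Decidable (Pre_solution contests k p) := by unfold Pre_solution; infer_instance
def pvWitness_solution : List (List Int) × Int × Int := ([[1], [2, 3]], 1, 2)

def Spec_solution (contests : List (List Int)) (k : Int) (p : Int) (out : List Int) : Prop := out = solution_alt contests k p
instance (contests : List (List Int)) (k : Int) (p : Int) (out : List Int) : Decidable (Spec_solution contests k p out) := by unfold Spec_solution; infer_instance

-- ===== CLAIM (what is proved, stated in full; the proofs are below) =====
def Claim_equal_solution : Prop := ∀ (contests : List (List Int)) (k : Int) (p : Int), Dom_solution contests k p → Pre_solution contests k p → Spec_solution contests k p (solution contests k p)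

-- ===== LEMMAS AND PROOFS =====

-- the count of problems ≤ p in a row
def cntI (p : Int) (row : List Int) : Int := (row.countP (fun x => decide (x ≤ p)) : Int)

-- count of contest i (i an index into contests)
def cOf (contests : List (List Int)) (p : Int) (i : Int) : Int :=
  cntI p (PySem.List.pyGetD contests i [])

-- indices whose count is cv, in increasing order
def bucketL (contests : List (List Int)) (p : Int) (cv : Int) : List Int :=
  (PySem.List.pyRange 0 (contests.length : Int) 1).filter
    (fun i => cOf contests p i == cv)

-- buckets g cnt ++ g (cnt-1) ++ … ++ g 0
def chainG (g : Int → List Int) (cnt : Int) : List Int :=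
  if 0 ≤ cnt then g cnt ++ chainG g (cnt - 1) else []
termination_by (cnt + 1).toNat
decreasing_by omega

lemma pickInner_eq (l : List Int) (picked : List Int) (need : Int) (h : 0 ≤ need) :
    pickInner l picked need =
      (picked ++ l.take need.toNat, need - (min need.toNat l.length : Nat)) := by
  induction l generalizing picked need with
  | nil => simp [pickInner]
  | cons i rest ih =>
      by_cases h0 : need ≤ 0
      · have : need = 0 := le_antisymm h0 h
        subst this; simp [pickInner]
      · have h1 : (0:Int) ≤ need - 1 := by omega
        rw [pickInner, if_neg (by omega), ih _ _ h1]
        simp only [Prod.mk.injEq]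
        constructor
        · simp only [List.append_assoc, List.singleton_append]
          congr 1
          have : need.toNat = (need - 1).toNat + 1 := by omega
          rw [this, List.take_succ_cons]
        · simp only [List.length_cons]
          omega

lemma pickLoop_eq (b : PySem.Dict Int (List Int)) (cnt need : Int) (picked : List Int)
    (h : 0 ≤ need) :
    pickLoop b need cnt picked = picked ++ (chainG (fun cv => b.getD cv []) cnt).take need.toNat := by
  induction hn : (cnt + 1).toNat using Nat.strong_induction_on generalizing cnt need picked with
  | _ n ih =>
  by_cases hc : 0 ≤ cnt
  · by_cases h0 : 0 < need
    · rw [pickLoop, if_pos ⟨h0, hc⟩, pickInner_eq _ _ _ h]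
      have h2 : (0:Int) ≤ need - (min need.toNat (b.getD cnt []).length : Nat) := by omega
      rw [ih ((cnt - 1) + 1).toNat (by omega) _ _ _ h2 rfl]
      conv_rhs => rw [chainG]
      have h3 : (need - ((min need.toNat (b.getD cnt []).length : Nat) : Int)).toNat
          = need.toNat - (b.getD cnt []).length := by omega
      rw [if_pos hc, List.take_append, List.append_assoc, h3]
    · have : need = 0 := by omega
      subst this
      rw [pickLoop, if_neg (by omega)]
      simp
  · rw [pickLoop, if_neg (by omega), chainG, if_neg hc]
    simp

-- the A-side inner counting loop is cntI
lemma cntA_eq (row : List Int) (p : Int) :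
    (PySem.List.pyRange 0 (PySem.List.len row) 1).foldl
      (fun cnt j => if PySem.List.pyGetD row j 0 ≤ p then cnt + 1 else cnt) (0 : Int)
    = cntI p row := by
  have := PySem.List.foldl_pyRange_zero_pyGetD' row 0
      (fun acc x => if x ≤ p then acc + 1 else acc) (0 : Int)
  simp only [PySem.List.len] at this ⊢
  rw [this, PySem.List.foldl_ite_add_one (fun x => x ≤ p), cntI]
  simp

-- the B-side counting loop is cntI
lemma cntB_eq (row : List Int) (p : Int) :
    row.foldl (fun cnt x => if x ≤ p then cnt + 1 else cnt) (0 : Int) = cntI p row := by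
  rw [PySem.List.foldl_ite_add_one (fun x => x ≤ p), cntI]
  simp

-- A's dict lookup
lemma dictA_getD (contests : List (List Int)) (p : Int) (x : Int)
    (hx : x ∈ PySem.List.pyRange 0 (contests.length : Int) 1) :
    ((PySem.List.pyRange 0 (PySem.List.len contests) 1).foldl (fun d i =>
      let row := PySem.List.pyGetD contests i []
      let cnt := (PySem.List.pyRange 0 (PySem.List.len row) 1).foldl
        (fun cnt j => if PySem.List.pyGetD row j 0 ≤ p then cnt + 1 else cnt) (0 : Int)
      d.insert i cnt) PySem.Dict.empty).getD x 0 = cOf contests p x := by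
  have hnodupr : (List.map (fun (i : Int) => i) (PySem.List.pyRange 0 (PySem.List.len contests) 1)).Nodup := by
    simpa using PySem.List.nodup_pyRange_one 0 (PySem.List.len contests)
  have hitems :
      ((PySem.List.pyRange 0 (PySem.List.len contests) 1).foldl (fun d i =>
        let row := PySem.List.pyGetD contests i []
        let cnt := (PySem.List.pyRange 0 (PySem.List.len row) 1).foldl
          (fun cnt j => if PySem.List.pyGetD row j 0 ≤ p then cnt + 1 else cnt) (0 : Int)
        d.insert i cnt) PySem.Dict.empty).items
      = PySem.Dict.empty.items ++
          (PySem.List.pyRange 0 (PySem.List.len contests) 1).map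
            (fun i => (i, cOf contests p i)) := by
    have := PySem.Dict.items_foldl_insert_fresh
      (PySem.List.pyRange 0 (PySem.List.len contests) 1) (fun (i : Int) => i)
      (fun i => (PySem.List.pyRange 0 (PySem.List.len (PySem.List.pyGetD contests i [])) 1).foldl
        (fun cnt j => if PySem.List.pyGetD (PySem.List.pyGetD contests i []) j 0 ≤ p then cnt + 1 else cnt) (0 : Int))
      PySem.Dict.empty (by intro a _; simp) hnodupr
    rw [show ((PySem.List.pyRange 0 (PySem.List.len contests) 1).foldl (fun d i =>
        let row := PySem.List.pyGetD contests i []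
        let cnt := (PySem.List.pyRange 0 (PySem.List.len row) 1).foldl
          (fun cnt j => if PySem.List.pyGetD row j 0 ≤ p then cnt + 1 else cnt) (0 : Int)
        d.insert i cnt) PySem.Dict.empty)
      = ((PySem.List.pyRange 0 (PySem.List.len contests) 1).foldl (fun d i =>
        d.insert ((fun (i : Int) => i) i)
          ((fun i => (PySem.List.pyRange 0 (PySem.List.len (PySem.List.pyGetD contests i [])) 1).foldl
            (fun cnt j => if PySem.List.pyGetD (PySem.List.pyGetD contests i []) j 0 ≤ p then cnt + 1 else cnt) (0 : Int)) i))
        PySem.Dict.empty) from rfl, this]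
    congr 1
    apply List.map_congr_left
    intro i _
    show (i, (PySem.List.pyRange 0 (PySem.List.len (PySem.List.pyGetD contests i [])) 1).foldl
        (fun cnt j => if PySem.List.pyGetD (PySem.List.pyGetD contests i []) j 0 ≤ p then cnt + 1 else cnt) (0 : Int))
      = (i, cOf contests p i)
    rw [cntA_eq]
    rfl
  have hnd :
      ((PySem.List.pyRange 0 (PySem.List.len contests) 1).foldl (fun d i =>
        let row := PySem.List.pyGetD contests i []
        let cnt := (PySem.List.pyRange 0 (PySem.List.len row) 1).foldl
          (fun cnt j => if PySem.List.pyGetD row j 0 ≤ p then cnt + 1 else cnt) (0 : Int)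
        d.insert i cnt) PySem.Dict.empty).keys.Nodup := by
    exact PySem.Dict.nodup_keys_foldl_insert_key
      (PySem.List.pyRange 0 (PySem.List.len contests) 1) (fun (i : Int) => i) _
      PySem.Dict.empty PySem.Dict.nodup_keys_empty
  apply PySem.Dict.getD_of_mem_items _ _ hnd
  rw [hitems]
  simp only [PySem.Dict.empty, List.nil_append, List.mem_map]
  exact ⟨x, by simpa using hx, rfl⟩

-- B's dict lookup
lemma dictB_getD (contests : List (List Int)) (p : Int) (cv : Int) :
    ((PySem.List.enumerate contests).foldl
      (fun (d : PySem.Dict Int (List Int)) ic =>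
        d.modify (ic.2.foldl (fun cnt x => if x ≤ p then cnt + 1 else cnt) (0 : Int)) []
          (· ++ [ic.1])) PySem.Dict.empty).getD cv []
    = bucketL contests p cv := by
  have h1 : ((PySem.List.enumerate contests).map
        (fun ic : Int × List Int =>
          ((ic.2.foldl (fun cnt x => if x ≤ p then cnt + 1 else cnt) (0 : Int)), ic.1))).foldl
      (fun (d : PySem.Dict Int (List Int)) q => d.modify q.1 [] (· ++ [q.2])) PySem.Dict.empty
      = (PySem.List.enumerate contests).foldl
      (fun (d : PySem.Dict Int (List Int)) ic =>
        d.modify (ic.2.foldl (fun cnt x => if x ≤ p then cnt + 1 else cnt) (0 : Int)) []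
          (· ++ [ic.1])) PySem.Dict.empty := List.foldl_map
  rw [← h1, PySem.Dict.getD_foldl_modify_append]
  rw [PySem.List.enumerate_eq_map_pyRange contests []]
  simp only [List.map_map, List.filter_map]
  simp only [PySem.Dict.getD_empty, List.nil_append]
  rw [bucketL]
  have hc : ∀ j ∈ PySem.List.pyRange 0 (PySem.List.len contests) 1,
      ((fun p_1 : Int × Int => p_1.1 == cv) ∘
        (fun ic : Int × List Int => (ic.2.foldl (fun cnt x => if x ≤ p then cnt + 1 else cnt) (0 : Int), ic.1)) ∘
        fun j => (j, PySem.List.pyGetD contests j [])) j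
      = (fun i => cOf contests p i == cv) j := by
    intro j _
    simp only [Function.comp]
    rw [cntB_eq]
    rfl
  rw [List.filter_congr hc]
  have hm : ∀ j ∈ (PySem.List.pyRange 0 (PySem.List.len contests) 1).filter (fun i => cOf contests p i == cv),
      ((fun x : Int × Int => x.2) ∘
        (fun ic : Int × List Int => (ic.2.foldl (fun cnt x => if x ≤ p then cnt + 1 else cnt) (0 : Int), ic.1)) ∘
        fun j => (j, PySem.List.pyGetD contests j [])) j = j := by
    intro j _; rfl
  rw [List.map_congr_left hm, List.map_id']
  simp [PySem.List.len]

lemma mem_bucketL (contests : List (List Int)) (p : Int) (cv i : Int) :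
    i ∈ bucketL contests p cv ↔
      (0 ≤ i ∧ i < (contests.length : Int)) ∧ cOf contests p i = cv := by
  simp [bucketL, List.mem_filter, PySem.List.mem_pyRange_one]

lemma cOf_nonneg (contests : List (List Int)) (p i : Int) : 0 ≤ cOf contests p i := by
  simp [cOf, cntI]

lemma chainG_perm (contests : List (List Int)) (p : Int) (t : Int) :
    (chainG (bucketL contests p) t).Perm
      ((PySem.List.pyRange 0 (contests.length : Int) 1).filter
        (fun i => decide (cOf contests p i ≤ t))) := by
  induction hn : (t + 1).toNat using Nat.strong_induction_on generalizing t with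
  | _ n ih =>
  by_cases hc : 0 ≤ t
  · rw [chainG, if_pos hc]
    have hperm := List.filter_append_perm (fun i => cOf contests p i == t)
      ((PySem.List.pyRange 0 (contests.length : Int) 1).filter (fun i => decide (cOf contests p i ≤ t)))
    have e1 : ((PySem.List.pyRange 0 (contests.length : Int) 1).filter
          (fun i => decide (cOf contests p i ≤ t))).filter (fun i => cOf contests p i == t)
        = bucketL contests p t := by
      rw [List.filter_filter, bucketL]
      apply List.filter_congr
      intro x _
      apply Bool.eq_iff_iff.mpr
      simp only [Bool.and_eq_true, beq_iff_eq, decide_eq_true_eq]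
      omega
    have e2 : ((PySem.List.pyRange 0 (contests.length : Int) 1).filter
          (fun i => decide (cOf contests p i ≤ t))).filter (fun i => !(cOf contests p i == t))
        = (PySem.List.pyRange 0 (contests.length : Int) 1).filter
            (fun i => decide (cOf contests p i ≤ t - 1)) := by
      rw [List.filter_filter]
      apply List.filter_congr
      intro x _
      apply Bool.eq_iff_iff.mpr
      simp only [Bool.and_eq_true, Bool.not_eq_true', beq_eq_false_iff_ne,
        decide_eq_true_eq]
      omega
    rw [e1, e2] at hperm
    exact (List.Perm.append_left (bucketL contests p t)
      (ih ((t - 1) + 1).toNat (by omega) (t - 1) rfl)).trans hperm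
  · rw [chainG, if_neg hc]
    have : (PySem.List.pyRange 0 (contests.length : Int) 1).filter
        (fun i => decide (cOf contests p i ≤ t)) = [] := by
      apply List.filter_eq_nil_iff.mpr
      intro a _
      have := cOf_nonneg contests p a
      simp only [decide_eq_true_eq]
      omega
    rw [this]

lemma chainG_pairwise (contests : List (List Int)) (p : Int) (t : Int) :
    (chainG (bucketL contests p) t).Pairwise
      (fun a b => -(cOf contests p a) * (contests.length : Int) + a
                < -(cOf contests p b) * (contests.length : Int) + b) := by
  induction hn : (t + 1).toNat using Nat.strong_induction_on generalizing t with
  | _ n ih =>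
  by_cases hc : 0 ≤ t
  · rw [chainG, if_pos hc]
    rw [List.pairwise_append]
    refine ⟨?_, ih ((t - 1) + 1).toNat (by omega) (t - 1) rfl, ?_⟩
    · rw [bucketL, List.pairwise_filter]
      have hbase := (List.Pairwise.and_mem).mp
        (PySem.List.pairwise_lt_pyRange_one 0 (contests.length : Int))
      refine hbase.imp ?_
      intro a b hab
      obtain ⟨ha, hb, hlt⟩ := hab
      intro hfa hfb
      rw [PySem.List.mem_pyRange_one] at ha hb
      have hca : cOf contests p a = t := by simpa using hfa
      have hcb : cOf contests p b = t := by simpa using hfb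
      rw [hca, hcb]
      omega
    · intro a ha b hb
      have hma := (mem_bucketL contests p t a).mp ha
      have hmb : b ∈ (PySem.List.pyRange 0 (contests.length : Int) 1).filter
          (fun i => decide (cOf contests p i ≤ t - 1)) :=
        (chainG_perm contests p (t - 1)).mem_iff.mp hb
      rw [List.mem_filter, PySem.List.mem_pyRange_one] at hmb
      obtain ⟨⟨hb0, hbn⟩, hcb⟩ := hmb
      simp only [decide_eq_true_eq] at hcb
      obtain ⟨⟨ha0, han⟩, hca⟩ := hma
      rw [hca]
      have hmul : cOf contests p b * (contests.length : Int)
          ≤ (t - 1) * (contests.length : Int) :=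
        mul_le_mul_of_nonneg_right hcb (by positivity)
      nlinarith [hmul]
  · rw [chainG, if_neg hc]
    exact List.Pairwise.nil

-- pointwise congruence for insertion into a sorted prefix
lemma insertBy_congr {α : Type} (f g : α → α → Bool) (x : α) (ys : List α)
    (h : ∀ y ∈ ys, f x y = g x y) :
    PySem.List.insertBy f x ys = PySem.List.insertBy g x ys := by
  induction ys with
  | nil => rfl
  | cons y ys ih =>
      simp only [PySem.List.insertBy]
      rw [h y (by simp)]
      by_cases hg : g x y = true
      · rw [if_pos hg, if_pos hg]
      · rw [if_neg hg, if_neg hg, ih (fun z hz => h z (by simp [hz]))]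

lemma foldl_insertBy_congr {α : Type} (S : List α) (f g : α → α → Bool)
    (l acc : List α) (hl : ∀ x ∈ l, x ∈ S) (hacc : ∀ y ∈ acc, y ∈ S)
    (h : ∀ a ∈ S, ∀ b ∈ S, f a b = g a b) :
    l.foldl (fun acc x => PySem.List.insertBy f x acc) acc
      = l.foldl (fun acc x => PySem.List.insertBy g x acc) acc := by
  induction l generalizing acc with
  | nil => rfl
  | cons x xs ih =>
      simp only [List.foldl_cons]
      rw [insertBy_congr f g x acc (fun y hy => h x (hl x (by simp)) y (hacc y hy))]
      apply ih
      · intro z hz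
        exact hl z (by simp [hz])
      · intro y hy
        rcases (PySem.List.mem_insertBy g x y acc).mp hy with h1 | h1
        · exact h1 ▸ hl x (by simp)
        · exact hacc y h1

-- A's sorted2 call names the chain
lemma sortedA_eq_chain (contests : List (List Int)) (p t : Int)
    (dA : PySem.Dict Int Int)
    (hd : ∀ x ∈ PySem.List.pyRange 0 (contests.length : Int) 1, dA.getD x 0 = cOf contests p x)
    (ht : ∀ i ∈ PySem.List.pyRange 0 (contests.length : Int) 1, cOf contests p i ≤ t) :
    PySem.List.sorted2 (PySem.List.pyRange 0 (contests.length : Int) 1)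
      (fun x => -(dA.getD x 0)) (fun x => x) false
    = chainG (bucketL contests p) t := by
  have hstep1 : PySem.List.sorted2 (PySem.List.pyRange 0 (contests.length : Int) 1)
      (fun x => -(dA.getD x 0)) (fun x => x) false
      = (PySem.List.pyRange 0 (contests.length : Int) 1).foldl
        (fun acc x => PySem.List.insertBy
          (fun a b => decide (-(dA.getD a 0) < -(dA.getD b 0)) ||
            (!decide (-(dA.getD b 0) < -(dA.getD a 0)) && decide (a < b)))
          x acc) [] := rfl
  have hstep2 : PySem.List.sorted (PySem.List.pyRange 0 (contests.length : Int) 1)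
      (fun x => -(cOf contests p x) * (contests.length : Int) + x)
      = (PySem.List.pyRange 0 (contests.length : Int) 1).foldl
        (fun acc x => PySem.List.insertBy
          (fun a b => decide (-(cOf contests p a) * (contests.length : Int) + a
            < -(cOf contests p b) * (contests.length : Int) + b)) x acc) [] :=
    PySem.List.sorted_eq_foldl_insertBy _ _
  rw [hstep1,
    foldl_insertBy_congr (PySem.List.pyRange 0 (contests.length : Int) 1) _
      (fun a b => decide (-(cOf contests p a) * (contests.length : Int) + a
        < -(cOf contests p b) * (contests.length : Int) + b))
      _ [] (fun x hx => hx) (by simp) ?_,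
    ← hstep2]
  · exact PySem.List.sorted_eq_of_perm_of_pairwise_lt _ _ _
      (by
        have hp := chainG_perm contests p t
        have hself : (PySem.List.pyRange 0 (contests.length : Int) 1).filter
            (fun i => decide (cOf contests p i ≤ t))
            = PySem.List.pyRange 0 (contests.length : Int) 1 := by
          apply List.filter_eq_self.mpr
          intro a ha
          simpa using ht a ha
        rwa [hself] at hp)
      (chainG_pairwise contests p t)
  · intro a ha b hb
    rw [hd a ha, hd b hb]
    rw [PySem.List.mem_pyRange_one] at ha hb
    have hn1 : (1 : Int) ≤ (contests.length : Int) := by omega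
    rcases lt_trichotomy (cOf contests p a) (cOf contests p b) with hlt | heq | hgt
    · have h1 : ¬(-(cOf contests p a) < -(cOf contests p b)) := by omega
      have hmul : (cOf contests p a + 1) * (contests.length : Int)
          ≤ cOf contests p b * (contests.length : Int) :=
        mul_le_mul_of_nonneg_right (by omega) (by omega)
      have h2 : ¬(-(cOf contests p a) * (contests.length : Int) + a
          < -(cOf contests p b) * (contests.length : Int) + b) := by nlinarith
      rw [add_mul, one_mul] at hmul
      simp [h1, (by omega : -(cOf contests p b) < -(cOf contests p a))]
      linarith
    · have hprod : cOf contests p a * (contests.length : Int)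
          = cOf contests p b * (contests.length : Int) := by rw [heq]
      apply Bool.eq_iff_iff.mpr
      simp only [Bool.or_eq_true, Bool.and_eq_true, Bool.not_eq_true', decide_eq_true_eq,
        decide_eq_false_iff_not]
      constructor
      · rintro (hlt2 | ⟨_, hab⟩)
        · exact absurd hlt2 (by omega)
        · linarith [hprod]
      · intro hlt2
        right
        exact ⟨by omega, by linarith [hprod]⟩
    · have h1 : -(cOf contests p a) < -(cOf contests p b) := by omega
      have hmul : (cOf contests p b + 1) * (contests.length : Int)
          ≤ cOf contests p a * (contests.length : Int) :=
        mul_le_mul_of_nonneg_right (by omega) (by omega)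
      have h2 : -(cOf contests p a) * (contests.length : Int) + a
          < -(cOf contests p b) * (contests.length : Int) + b := by nlinarith
      simp [h1]
      linarith

-- B's running maximum bounds every count
lemma topB_spec (contests : List (List Int)) (p : Int) :
    0 ≤ (PySem.List.enumerate contests).foldl
        (fun t ic => if t < ic.2.foldl (fun cnt x => if x ≤ p then cnt + 1 else cnt) (0 : Int)
          then ic.2.foldl (fun cnt x => if x ≤ p then cnt + 1 else cnt) (0 : Int) else t) 0
    ∧ ∀ i ∈ PySem.List.pyRange 0 (contests.length : Int) 1,
        cOf contests p i ≤ (PySem.List.enumerate contests).foldl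
          (fun t ic => if t < ic.2.foldl (fun cnt x => if x ≤ p then cnt + 1 else cnt) (0 : Int)
            then ic.2.foldl (fun cnt x => if x ≤ p then cnt + 1 else cnt) (0 : Int) else t) 0 := by
  have hmax : (PySem.List.enumerate contests).foldl
      (fun t ic => if t < ic.2.foldl (fun cnt x => if x ≤ p then cnt + 1 else cnt) (0 : Int)
        then ic.2.foldl (fun cnt x => if x ≤ p then cnt + 1 else cnt) (0 : Int) else t) 0
      = (PySem.List.enumerate contests).foldl
        (fun acc ic => max acc (ic.2.foldl (fun cnt x => if x ≤ p then cnt + 1 else cnt) (0 : Int))) 0 := by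
    apply PySem.List.foldl_congr_mem
    intro acc x _
    by_cases h : acc < x.2.foldl (fun cnt x => if x ≤ p then cnt + 1 else cnt) (0 : Int)
    · rw [if_pos h, max_eq_right (le_of_lt h)]
    · rw [if_neg h, max_eq_left (by omega)]
  rw [hmax]
  have hb := PySem.List.le_foldl_max_int (PySem.List.enumerate contests)
    (fun ic => ic.2.foldl (fun cnt x => if x ≤ p then cnt + 1 else cnt) (0 : Int)) 0
  refine ⟨hb.1, ?_⟩
  intro i hi
  have hmem : (i, PySem.List.pyGetD contests i []) ∈ PySem.List.enumerate contests := by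
    rw [PySem.List.enumerate_eq_map_pyRange contests []]
    apply List.mem_map_of_mem
    simpa [PySem.List.len] using hi
  have := hb.2 _ hmem
  simpa [cntB_eq, cOf] using this

-- a slice [0:k] that reaches back past the front is empty
lemma slice_neg_big (xs : List Int) (k : Int) (hk : k < 0)
    (hlen : k + (xs.length : Int) ≤ 0) :
    PySem.List.slice xs (some 0) (some k) = [] := by
  rw [PySem.List.slice_zero_start]
  have hk' : k = -(((-k).toNat : Nat) : Int) := by omega
  rw [hk', PySem.List.slice_to_neg_natCast xs _ (by omega)]
  have h0 : xs.length - (-k).toNat = 0 := by omega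
  rw [h0, List.take_zero]

-- ===== VERDICT (by name: the statement is the Claim_ definition above) =====
theorem solution_spec : Claim_equal_solution := by
  intro contests k p _ hpre
  unfold Pre_solution at hpre
  show solution contests k p = solution_alt contests k p
  by_cases hk : 0 ≤ k
  case neg =>
    have hkneg : k < 0 := by omega
    have hkn : k + (contests.length : Int) ≤ 0 := by
      rcases hpre with h | h
      · omega
      · exact h
    show PySem.List.sorted
        (PySem.List.slice
          (PySem.List.sorted2 (PySem.List.pyRange 0 (PySem.List.len contests) 1)
            (fun x => -(((PySem.List.pyRange 0 (PySem.List.len contests) 1).foldl (fun d i =>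
              let row := PySem.List.pyGetD contests i []
              let cnt := (PySem.List.pyRange 0 (PySem.List.len row) 1).foldl
                (fun cnt j => if PySem.List.pyGetD row j 0 ≤ p then cnt + 1 else cnt) (0 : Int)
              d.insert i cnt) PySem.Dict.empty).getD x 0)) (fun x => x) false)
          (some 0) (some k))
        (fun x => x) false
      = PySem.List.sorted
        (pickLoop
          ((PySem.List.enumerate contests).foldl
            (fun (acc : PySem.Dict Int (List Int) × Int) ic =>
              let cnt := ic.2.foldl (fun cnt x => if x ≤ p then cnt + 1 else cnt) (0 : Int)
              (acc.1.modify cnt [] (· ++ [ic.1]), if acc.2 < cnt then cnt else acc.2))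
            (PySem.Dict.empty, 0)).1
          k
          ((PySem.List.enumerate contests).foldl
            (fun (acc : PySem.Dict Int (List Int) × Int) ic =>
              let cnt := ic.2.foldl (fun cnt x => if x ≤ p then cnt + 1 else cnt) (0 : Int)
              (acc.1.modify cnt [] (· ++ [ic.1]), if acc.2 < cnt then cnt else acc.2))
            (PySem.Dict.empty, 0)).2
          []) (fun x => x) false
    rw [pickLoop, if_neg (by omega)]
    rw [slice_neg_big _ k hkneg (by
      have hperm := PySem.List.sorted2_perm (PySem.List.pyRange 0 (PySem.List.len contests) 1)
        (fun x => -(((PySem.List.pyRange 0 (PySem.List.len contests) 1).foldl (fun d i =>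
          let row := PySem.List.pyGetD contests i []
          let cnt := (PySem.List.pyRange 0 (PySem.List.len row) 1).foldl
            (fun cnt j => if PySem.List.pyGetD row j 0 ≤ p then cnt + 1 else cnt) (0 : Int)
          d.insert i cnt) PySem.Dict.empty).getD x 0)) (fun x => x) false
      rw [hperm.length_eq, PySem.List.length_pyRange_one]
      simp [PySem.List.len]
      omega)]
  case pos =>
  rename_i hpre2
  clear hpre2
  show PySem.List.sorted
      (PySem.List.slice
        (PySem.List.sorted2 (PySem.List.pyRange 0 (PySem.List.len contests) 1)
          (fun x => -(((PySem.List.pyRange 0 (PySem.List.len contests) 1).foldl (fun d i =>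
            let row := PySem.List.pyGetD contests i []
            let cnt := (PySem.List.pyRange 0 (PySem.List.len row) 1).foldl
              (fun cnt j => if PySem.List.pyGetD row j 0 ≤ p then cnt + 1 else cnt) (0 : Int)
            d.insert i cnt) PySem.Dict.empty).getD x 0)) (fun x => x) false)
        (some 0) (some k))
      (fun x => x) false
    = PySem.List.sorted
      (pickLoop
        ((PySem.List.enumerate contests).foldl
          (fun (acc : PySem.Dict Int (List Int) × Int) ic =>
            let cnt := ic.2.foldl (fun cnt x => if x ≤ p then cnt + 1 else cnt) (0 : Int)
            (acc.1.modify cnt [] (· ++ [ic.1]), if acc.2 < cnt then cnt else acc.2))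
          (PySem.Dict.empty, 0)).1
        k
        ((PySem.List.enumerate contests).foldl
          (fun (acc : PySem.Dict Int (List Int) × Int) ic =>
            let cnt := ic.2.foldl (fun cnt x => if x ≤ p then cnt + 1 else cnt) (0 : Int)
            (acc.1.modify cnt [] (· ++ [ic.1]), if acc.2 < cnt then cnt else acc.2))
          (PySem.Dict.empty, 0)).2
        []) (fun x => x) false
  have hsplit : (PySem.List.enumerate contests).foldl
      (fun (acc : PySem.Dict Int (List Int) × Int) ic =>
        let cnt := ic.2.foldl (fun cnt x => if x ≤ p then cnt + 1 else cnt) (0 : Int)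
        (acc.1.modify cnt [] (· ++ [ic.1]), if acc.2 < cnt then cnt else acc.2))
      (PySem.Dict.empty, 0)
      = ((PySem.List.enumerate contests).foldl
          (fun (d : PySem.Dict Int (List Int)) ic =>
            d.modify (ic.2.foldl (fun cnt x => if x ≤ p then cnt + 1 else cnt) (0 : Int)) []
              (· ++ [ic.1])) PySem.Dict.empty,
        (PySem.List.enumerate contests).foldl
          (fun t ic => if t < ic.2.foldl (fun cnt x => if x ≤ p then cnt + 1 else cnt) (0 : Int)
            then ic.2.foldl (fun cnt x => if x ≤ p then cnt + 1 else cnt) (0 : Int) else t) 0) := by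
    exact PySem.List.foldl_prod_mk
      (fun d (ic : Int × List Int) =>
        d.modify (ic.2.foldl (fun cnt x => if x ≤ p then cnt + 1 else cnt) (0 : Int)) []
          (· ++ [ic.1]))
      (fun t (ic : Int × List Int) =>
        if t < ic.2.foldl (fun cnt x => if x ≤ p then cnt + 1 else cnt) (0 : Int)
          then ic.2.foldl (fun cnt x => if x ≤ p then cnt + 1 else cnt) (0 : Int) else t)
      (PySem.List.enumerate contests) PySem.Dict.empty 0
  rw [hsplit]
  obtain ⟨-, htble⟩ := topB_spec contests p
  rw [pickLoop_eq _ _ _ _ hk]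
  have hbfun : (fun cv => ((PySem.List.enumerate contests).foldl
      (fun (d : PySem.Dict Int (List Int)) ic =>
        d.modify (ic.2.foldl (fun cnt x => if x ≤ p then cnt + 1 else cnt) (0 : Int)) []
          (· ++ [ic.1])) PySem.Dict.empty).getD cv [])
      = bucketL contests p := funext (fun cv => dictB_getD contests p cv)
  rw [hbfun]
  have hA : PySem.List.sorted2 (PySem.List.pyRange 0 (PySem.List.len contests) 1)
      (fun x => -(((PySem.List.pyRange 0 (PySem.List.len contests) 1).foldl (fun d i =>
        let row := PySem.List.pyGetD contests i []
        let cnt := (PySem.List.pyRange 0 (PySem.List.len row) 1).foldl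
          (fun cnt j => if PySem.List.pyGetD row j 0 ≤ p then cnt + 1 else cnt) (0 : Int)
        d.insert i cnt) PySem.Dict.empty).getD x 0)) (fun x => x) false
      = chainG (bucketL contests p)
          ((PySem.List.enumerate contests).foldl
            (fun t ic => if t < ic.2.foldl (fun cnt x => if x ≤ p then cnt + 1 else cnt) (0 : Int)
              then ic.2.foldl (fun cnt x => if x ≤ p then cnt + 1 else cnt) (0 : Int) else t) 0) := by
    have hlen : PySem.List.len contests = (contests.length : Int) := by
      simp [PySem.List.len]
    rw [hlen]
    exact sortedA_eq_chain contests p _ _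
      (fun x hx => dictA_getD contests p x hx) htble
  rw [hA]
  have hknat : k = ((k.toNat : Nat) : Int) := by omega
  conv_lhs => rw [hknat, PySem.List.slice_zero_start, PySem.List.slice_to_natCast]
  simp
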